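-- pv_equiv track=rewrite | github.com/MrLiuBee/IREngine | web/engine.py | kgrams
-- ===== SOURCE A (Python) =====
-- def kgrams(term, pos):
-- 	"""Generate kgrams for wildcard subset"""
-- 	# k = self.store.kgrams_length
-- 	k = 2
-- 	kgrams = []
-- 	if pos == 'start':
-- 		kgrams.append("$" + term[0:k-1])
--
-- 	for i in range(len(term) - (k-1)):
-- 		kgrams.append(term[i:i+k])
--
-- 	if pos == 'end':
-- 		kgrams.append(term[-(k-1):] + "$")
-- 	return [t for t in kgrams if len(t) == k]
-- ===== SOURCE B (Python) =====
-- def kgrams(term, pos):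
--     # streaming scan: carry the previous character (seeded with '$' for pos=='start'),
--     # emit prev+ch for each character, and flush prev+'$' at the end for pos=='end'
--     out = []
--     prev = '$' if pos == 'start' else None
--     for ch in term:
--         if prev is not None:
--             out.append(prev + ch)
--         prev = ch
--     if pos == 'end' and prev is not None:
--         out.append(prev + '$')
--     return out
-- ===== Notes on version B (the rewrite author's own statement) =====
-- stated objective: alternative
-- what changed: B replaces A's index-slicing loop with boundary appends and a trailing length-2 filter by a single streaming scan that carries the previous character (seeded with '$' for pos=='start'), emitting prev+ch per step and flushing prev+'$' for pos=='end'; no slices, no filter pass.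
import Mathlib
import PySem

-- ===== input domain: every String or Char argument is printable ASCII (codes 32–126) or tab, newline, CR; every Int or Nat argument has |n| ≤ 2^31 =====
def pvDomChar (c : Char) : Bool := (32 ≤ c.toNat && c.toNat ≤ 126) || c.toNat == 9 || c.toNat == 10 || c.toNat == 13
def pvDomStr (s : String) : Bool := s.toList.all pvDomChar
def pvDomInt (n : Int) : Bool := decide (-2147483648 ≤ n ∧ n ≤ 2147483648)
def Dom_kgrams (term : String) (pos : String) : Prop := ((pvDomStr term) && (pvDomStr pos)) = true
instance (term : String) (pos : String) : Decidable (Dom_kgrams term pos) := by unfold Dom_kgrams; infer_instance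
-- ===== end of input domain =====

-- B change (objective: alternative): a streaming scan carrying the previous character
-- replaces A's index-slicing loop with boundary appends and the trailing length-2 filter.

-- ===== PORT A =====
-- literal transliteration of Source A: k = 2; optional "$"+term[0:k-1]; the sliding loop;
-- optional term[-(k-1):]+"$"; then the length-==-k filter.
def kgrams (term : String) (pos : String) : List String :=
  let t := term.toList
  let k : Int := 2
  let g0 : List (List Char) := []
  let g1 := if pos == "start" then g0 ++ [['$'] ++ PySem.List.slice t (some 0) (some (k - 1))] else g0
  let g2 := (PySem.List.pyRange 0 ((t.length : Int) - (k - 1)) 1).foldl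
      (fun acc i => acc ++ [PySem.List.slice t (some i) (some (i + k))]) g1
  let g3 := if pos == "end" then g2 ++ [PySem.List.slice t (some (-(k - 1))) none ++ ['$']] else g2
  (g3.filter (fun g => (g.length : Int) == k)).map String.ofList

-- ===== PORT B =====
-- loop body of Source B's for-loop: state is (prev : Option Char, out)
def kstep (st : Option Char × List String) (ch : Char) : Option Char × List String :=
  match st.1 with
  | some p => (some ch, st.2 ++ [String.ofList [p, ch]])
  | none => (some ch, st.2)

-- transliteration of Source B: seed prev, stream the characters, flush for pos=='end'
def kgrams_alt (term : String) (pos : String) : List String :=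
  let init : Option Char × List String := (if pos == "start" then some '$' else none, [])
  let st := term.toList.foldl kstep init
  if pos == "end" then
    match st.1 with
    | some p => st.2 ++ [String.ofList [p, '$']]
    | none => st.2
  else st.2

-- ===== PRECONDITION & SPEC =====
def Spec_kgrams (term : String) (pos : String) (out : List String) : Prop := out = kgrams_alt term pos
instance (term : String) (pos : String) (out : List String) : Decidable (Spec_kgrams term pos out) := by unfold Spec_kgrams; infer_instance

-- ===== CLAIM (what is proved, stated in full; the proofs are below) =====
def Claim_equal_kgrams : Prop := ∀ (term : String) (pos : String), Dom_kgrams term pos → Spec_kgrams term pos (kgrams term pos)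

-- ===== LEMMAS AND PROOFS =====

/-- adjacent 2-windows of a char list: the common characterisation of both ports -/
def windows2 : List Char → List (List Char)
  | [] => []
  | [_] => []
  | a :: b :: r => [a, b] :: windows2 (b :: r)

theorem foldl_app (l : List Int) (f : Int → List Char) (init : List (List Char)) :
    l.foldl (fun acc i => acc ++ [f i]) init = init ++ l.map f := by
  induction l generalizing init with
  | nil => simp
  | cons x xs ih => simp [List.foldl, ih]

theorem range_drop_take (cs : List Char) :
    (List.range (cs.length - 1)).map (fun j => (cs.drop j).take 2) = windows2 cs := by
  induction cs with
  | nil => simp [windows2]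
  | cons a cs' ih =>
    cases cs' with
    | nil => simp [windows2]
    | cons b r =>
      have h : (a :: b :: r).length - 1 = r.length + 1 := by simp
      have ht : (b :: r).length - 1 = r.length := by simp
      rw [ht] at ih
      rw [h, List.range_succ_eq_map, List.map_cons, List.map_map]
      show _ :: _ = ([a, b] :: windows2 (b :: r) : List (List Char))
      rw [← ih]
      congr 1

theorem map_slice_windows (cs : List Char) :
    (PySem.List.pyRange 0 ((cs.length : Int) - 1) 1).map
      (fun i => PySem.List.slice cs (some i) (some (i + 2))) = windows2 cs := by
  rw [PySem.List.pyRange_one]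
  have hc : (((cs.length : Int) - 1) - 0).toNat = cs.length - 1 := by omega
  rw [hc, List.map_map]
  rw [← range_drop_take cs]
  apply List.map_congr_left
  intro j _
  simp only [Function.comp, zero_add]
  have h2 : ((j : Int) + 2) = ((j : Int) + ((2 : Nat) : Int)) := by norm_num
  rw [h2, PySem.List.slice_natCast_add]

theorem windows2_len (cs : List Char) : ∀ x ∈ windows2 cs, x.length = 2 := by
  induction cs with
  | nil => simp [windows2]
  | cons a cs' ih =>
    cases cs' with
    | nil => simp [windows2]
    | cons b r =>
      intro x hx
      simp only [windows2, List.mem_cons] at hx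
      rcases hx with h | h
      · subst h; rfl
      · exact ih x h

theorem drop_len_sub_one (c : Char) (r : List Char) :
    (c :: r).drop ((c :: r).length - 1) = [r.getLastD c] := by
  induction r generalizing c with
  | nil => rfl
  | cons c2 r2 ih =>
    have h : (c :: c2 :: r2).length - 1 = ((c2 :: r2).length - 1) + 1 := by simp
    rw [h, List.drop_succ_cons, ih c2, List.getLastD_cons]

theorem windows2_append_last (cs : List Char) (h : cs ≠ []) (c : Char) :
    windows2 (cs ++ [c]) = windows2 cs ++ [cs.drop (cs.length - 1) ++ [c]] := by
  induction cs with
  | nil => exact absurd rfl h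
  | cons a cs' ih =>
    cases cs' with
    | nil => simp [windows2]
    | cons b r =>
      have hne : (b :: r : List Char) ≠ [] := by simp
      have hih := ih hne
      simp only [List.cons_append] at hih ⊢
      simp only [windows2, hih]
      simp

theorem filter_windows2 (cs : List Char) :
    (windows2 cs).filter (fun g => ((g.length : Int) == 2)) = windows2 cs := by
  apply List.filter_eq_self.mpr
  intro x hx
  simp [windows2_len cs x hx]

/-- A computes the (ofList-mapped) 2-windows of the padded character list. -/
theorem kgrams_eq_windows (term pos : String) :
    kgrams term pos =
      (windows2 ((if pos == "start" then ['$'] else []) ++ term.toList ++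
                 (if pos == "end" then ['$'] else []))).map String.ofList := by
  unfold kgrams
  set cs := term.toList with hcs
  cases hstart : (pos == "start") <;> cases hend : (pos == "end")
  -- start=false end=false
  · simp only [Bool.false_eq_true, if_false, List.nil_append,
      List.append_nil, foldl_app]
    norm_num
    rw [map_slice_windows, filter_windows2]
  -- start=false end=true
  · simp only [Bool.false_eq_true, if_false, if_true, List.nil_append,
      foldl_app]
    norm_num
    rw [PySem.List.slice_from_neg_one, map_slice_windows]
    cases cs with
    | nil => simp [windows2, List.filter]
    | cons c r =>
      rw [windows2_append_last (c :: r) (by simp) '$', List.map_append, filter_windows2]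
      congr 1
      rw [drop_len_sub_one, List.filter_cons_of_pos (by simp), List.filter_nil]
  -- start=true end=false
  · simp only [Bool.false_eq_true, if_false, if_true, List.append_nil,
      foldl_app, List.nil_append]
    norm_num
    have hsl : PySem.List.slice cs none (some 1) = cs.take 1 := by
      rw [PySem.List.slice_to cs (by norm_num : (0:Int) ≤ 1)]
      rfl
    rw [hsl, map_slice_windows]
    cases cs with
    | nil => simp [windows2, List.filter]
    | cons c r =>
      have hw : windows2 ('$' :: c :: r) = ['$', c] :: windows2 (c :: r) := rfl
      rw [hw, show List.take 1 (c :: r) = [c] from rfl,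
          List.filter_cons_of_pos (by simp), filter_windows2]
  -- start=true end=true: impossible for one string
  · exfalso
    have h1 : pos = "start" := by simpa using hstart
    have h2 : pos = "end" := by simpa using hend
    rw [h1] at h2
    exact absurd h2 (by decide)

/-- B's fold, started with a live previous character, accumulates the 2-windows. -/
theorem foldl_kstep_some (cs : List Char) : ∀ (p : Char) (out0 : List String),
    cs.foldl kstep (some p, out0) =
      (some (cs.getLastD p), out0 ++ (windows2 (p :: cs)).map String.ofList) := by
  induction cs with
  | nil => intro p out0; simp [windows2]
  | cons c r ih =>
    intro p out0
    have hstep : kstep (some p, out0) c = (some c, out0 ++ [String.ofList [p, c]]) := rfl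
    rw [List.foldl_cons, hstep, ih c]
    have hw : windows2 (p :: c :: r) = [p, c] :: windows2 (c :: r) := rfl
    rw [hw, List.getLastD_cons]
    simp

/-- B also computes the (ofList-mapped) 2-windows of the padded character list. -/
theorem kgrams_alt_eq_windows (term pos : String) :
    kgrams_alt term pos =
      (windows2 ((if pos == "start" then ['$'] else []) ++ term.toList ++
                 (if pos == "end" then ['$'] else []))).map String.ofList := by
  unfold kgrams_alt
  set cs := term.toList with hcs
  cases hstart : (pos == "start") <;> cases hend : (pos == "end")
  -- start=false end=false
  · simp only [Bool.false_eq_true, if_false, List.nil_append, List.append_nil]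
    cases cs with
    | nil => simp [windows2]
    | cons c r =>
      rw [List.foldl_cons]
      have hstep : kstep (none, []) c = (some c, []) := rfl
      rw [hstep, foldl_kstep_some r c []]
      simp
  -- start=false end=true
  · simp only [Bool.false_eq_true, if_false, if_true, List.nil_append]
    cases cs with
    | nil => simp [windows2]
    | cons c r =>
      rw [List.foldl_cons]
      have hstep : kstep (none, []) c = (some c, []) := rfl
      rw [hstep, foldl_kstep_some r c []]
      rw [windows2_append_last (c :: r) (by simp) '$', drop_len_sub_one]
      simp
  -- start=true end=false
  · simp only [Bool.false_eq_true, if_false, if_true, List.append_nil]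
    rw [foldl_kstep_some cs '$' []]
    simp
  -- start=true end=true: impossible for one string
  · exfalso
    have h1 : pos = "start" := by simpa using hstart
    have h2 : pos = "end" := by simpa using hend
    rw [h1] at h2
    exact absurd h2 (by decide)

-- ===== VERDICT (by name: the statement is the Claim_ definition above) =====
theorem kgrams_spec : Claim_equal_kgrams := by
  intro term pos _
  unfold Spec_kgrams
  rw [kgrams_eq_windows, kgrams_alt_eq_windows]
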